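-- pv_equiv track=rewrite | github.com/Davion-Liu/AttChain | attack.py | get_rank_pos
-- ===== SOURCE A (Python) =====
-- def get_rank_pos(d_s_dict, wanted_docid):
--     ranked_docs = sorted(d_s_dict, key=d_s_dict.get, reverse=True)
--     index = 1
--     rank_pos = -1
--     for docid in ranked_docs:
--         if docid == wanted_docid:
--             rank_pos = index
--             break
--         index += 1
--     if rank_pos == -1:
--         return 100
--     return rank_pos
-- ===== SOURCE B (Python) =====
-- def get_rank_pos(d_s_dict, wanted_docid):
--     if wanted_docid not in d_s_dict:
--         return 100
--     w = d_s_dict[wanted_docid]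
--     rank = 1
--     seen = False
--     for docid, s in d_s_dict.items():
--         if docid == wanted_docid:
--             seen = True
--         elif s > w or (s == w and not seen):
--             rank += 1
--     return rank
-- ===== Notes on version B (the rewrite author's own statement) =====
-- stated objective: faster
-- what changed: replaces the O(n log n) sort-then-scan with a single O(n) pass that counts strictly higher scores plus earlier equal-score ties (the stable reverse sort's rank), returning 100 when the docid is absent
import Mathlib
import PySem

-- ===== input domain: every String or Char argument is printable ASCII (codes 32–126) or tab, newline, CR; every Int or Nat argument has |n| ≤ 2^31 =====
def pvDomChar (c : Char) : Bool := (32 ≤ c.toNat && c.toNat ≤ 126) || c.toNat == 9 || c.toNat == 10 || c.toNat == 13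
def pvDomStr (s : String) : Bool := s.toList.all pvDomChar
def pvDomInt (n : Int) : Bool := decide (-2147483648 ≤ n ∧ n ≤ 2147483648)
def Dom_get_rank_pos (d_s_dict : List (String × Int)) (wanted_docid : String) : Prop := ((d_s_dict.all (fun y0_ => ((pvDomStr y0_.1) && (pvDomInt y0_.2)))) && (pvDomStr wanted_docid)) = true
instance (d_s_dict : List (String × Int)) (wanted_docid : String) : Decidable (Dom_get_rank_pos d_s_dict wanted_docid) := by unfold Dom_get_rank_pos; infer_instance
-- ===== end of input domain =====

-- B replaces A's sort-then-scan by a single counting pass (O(n) instead of O(n log n)); same return value.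

-- ===== PORT A =====
-- the 'for docid in ranked: if docid == wanted: rank_pos = index; break; index += 1' loop (rank_pos stays -1 when not found)
def pvScanA : List String → String → Int → Int
  | [], _, _ => -1
  | x :: t, w, i => if x = w then i else pvScanA t w (i + 1)

def get_rank_pos (d_s_dict : List (String × Int)) (wanted_docid : String) : Int :=
  let dd := PySem.Dict.ofList d_s_dict
  -- key=d_s_dict.get: every element being sorted is a key of dd, so .get returns its value (the default 0 is never read)
  let ranked := PySem.List.sorted dd.keys (fun k => dd.getD k 0) true
  let rank_pos := pvScanA ranked wanted_docid 1
  if rank_pos = -1 then 100 else rank_pos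

-- ===== PORT B =====
-- the body of Source B's single loop over d_s_dict.items() with the 'seen' flag
def pvStepB (wanted_docid : String) (wv : Int) (acc : Int × Bool) (kv : String × Int) : Int × Bool :=
  if kv.1 = wanted_docid then (acc.1, true)
  else if wv < kv.2 ∨ (kv.2 = wv ∧ acc.2 = false) then (acc.1 + 1, acc.2)
  else acc

def get_rank_pos_alt (d_s_dict : List (String × Int)) (wanted_docid : String) : Int :=
  let dd := PySem.Dict.ofList d_s_dict
  match dd.get? wanted_docid with
  | none => 100
  | some wv => (dd.items.foldl (pvStepB wanted_docid wv) (1, false)).1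

-- ===== PRECONDITION & SPEC =====
def Spec_get_rank_pos (d_s_dict : List (String × Int)) (wanted_docid : String) (out : Int) : Prop := out = get_rank_pos_alt d_s_dict wanted_docid
instance (d_s_dict : List (String × Int)) (wanted_docid : String) (out : Int) : Decidable (Spec_get_rank_pos d_s_dict wanted_docid out) := by unfold Spec_get_rank_pos; infer_instance

-- ===== CLAIM (what is proved, stated in full; the proofs are below) =====
def Claim_equal_get_rank_pos : Prop := ∀ (d_s_dict : List (String × Int)) (wanted_docid : String), Dom_get_rank_pos d_s_dict wanted_docid → Spec_get_rank_pos d_s_dict wanted_docid (get_rank_pos d_s_dict wanted_docid)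

-- ===== LEMMAS AND PROOFS =====

-- Python's stable insertion (reverse=True) of x into a descending list, as used by PySem.List.sorted
def pvIns (key : String → Int) (x : String) (acc : List String) : List String :=
  PySem.List.insertBy (fun a b => decide (key b < key a)) x acc

theorem pvScanA_of_mem (l : List String) (w : String) (hw : w ∈ l) (i : Int) :
    pvScanA l w i = i + (l.idxOf w : Int) := by
  induction l generalizing i with
  | nil => cases hw
  | cons y t ih =>
    by_cases h : y = w
    · simp [pvScanA, h]
    · rcases List.mem_cons.mp hw with h' | h'
      · exact absurd h'.symm h
      · simp only [pvScanA, if_neg h, ih h']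
        simp [h]
        ring

theorem pvScanA_of_not_mem (l : List String) (w : String) (hw : w ∉ l) (i : Int) :
    pvScanA l w i = -1 := by
  induction l generalizing i with
  | nil => rfl
  | cons y t ih =>
    simp only [List.mem_cons, not_or] at hw
    simp [pvScanA, Ne.symm hw.1, ih hw.2]

theorem pv_sorted_snoc (key : String → Int) (l : List String) (x : String) :
    PySem.List.sorted (l ++ [x]) key true = pvIns key x (PySem.List.sorted l key true) := by
  rw [PySem.List.sorted_rev_eq_foldl_insertBy, PySem.List.sorted_rev_eq_foldl_insertBy,
    List.foldl_append]
  rfl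

theorem pvIns_cons (key : String → Int) (x y : String) (t : List String) :
    pvIns key x (y :: t) = if key y < key x then x :: y :: t else y :: pvIns key x t := by
  simp [pvIns, PySem.List.insertBy]

theorem pv_idxOf_ins_of_mem (key : String → Int) (x w : String) (acc : List String)
    (hp : acc.Pairwise (fun a b => key b ≤ key a)) (hw : w ∈ acc) (hx : x ≠ w) :
    (pvIns key x acc).idxOf w = if key w < key x then acc.idxOf w + 1 else acc.idxOf w := by
  induction acc with
  | nil => cases hw
  | cons y t ih =>
    rcases List.pairwise_cons.mp hp with ⟨hy, ht⟩
    rw [pvIns_cons]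
    by_cases hb : key y < key x
    · have hwx : key w < key x := by
        rcases List.mem_cons.mp hw with h' | h'
        · exact h' ▸ hb
        · exact lt_of_le_of_lt (hy w h') hb
      rw [if_pos hb, if_pos hwx, List.idxOf_cons_ne _ hx]
    · rw [if_neg hb]
      by_cases hyw : y = w
      · have hnlt : ¬ key w < key x := by rw [← hyw]; exact hb
        subst hyw
        rw [if_neg hnlt, List.idxOf_cons_self, List.idxOf_cons_self]
      · rcases List.mem_cons.mp hw with h' | h'
        · exact absurd h'.symm hyw
        · rw [List.idxOf_cons_ne _ hyw, List.idxOf_cons_ne _ hyw, ih ht h']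
          split_ifs <;> omega

theorem pv_idxOf_ins_self (key : String → Int) (w : String) (acc : List String)
    (hp : acc.Pairwise (fun a b => key b ≤ key a)) (hw : w ∉ acc) :
    (pvIns key w acc).idxOf w = acc.countP (fun y => decide (key w ≤ key y)) := by
  induction acc with
  | nil => simp [pvIns, PySem.List.insertBy]
  | cons y t ih =>
    rcases List.pairwise_cons.mp hp with ⟨hy, ht⟩
    simp only [List.mem_cons, not_or] at hw
    rw [pvIns_cons]
    by_cases hb : key y < key w
    · have hzero : t.countP (fun z => decide (key w ≤ key z)) = 0 := by
        rw [List.countP_eq_zero]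
        intro z hz
        simp only [decide_eq_true_eq]
        exact not_le.mpr (lt_of_le_of_lt (hy z hz) hb)
      rw [if_pos hb, List.idxOf_cons_self, List.countP_cons]
      simp [not_le.mpr hb, hzero]
    · rw [if_neg hb, List.idxOf_cons_ne _ (fun h => hw.1 h.symm), ih ht hw.2, List.countP_cons]
      simp [not_lt.mp hb]

theorem pv_idxOf_sorted (key : String → Int) (w : String) (p s : List String)
    (hnd : (p ++ w :: s).Nodup) :
    (PySem.List.sorted (p ++ w :: s) key true).idxOf w =
      p.countP (fun y => decide (key w ≤ key y)) + s.countP (fun y => decide (key w < key y)) := by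
  induction s using List.reverseRecOn with
  | nil =>
    have hwp : w ∉ p := by
      intro h
      exact (List.nodup_append.mp hnd).2.2 w h w List.mem_cons_self rfl
    have hws : w ∉ PySem.List.sorted p key true := by
      rw [PySem.List.mem_sorted]; exact hwp
    have := pv_idxOf_ins_self key w (PySem.List.sorted p key true)
      (PySem.List.sorted_pairwise_rev p key) hws
    rw [show p ++ w :: ([] : List String) = p ++ [w] by simp, pv_sorted_snoc, this,
      (PySem.List.sorted_perm p key true).countP_eq]
    simp
  | append_singleton s' x ih =>
    have hre : p ++ w :: (s' ++ [x]) = (p ++ w :: s') ++ [x] := by simp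
    rw [hre] at hnd ⊢
    have hnd' : (p ++ w :: s').Nodup := hnd.of_append_left
    have hxw : x ≠ w := by
      intro h
      rcases List.nodup_append.mp hnd with ⟨_, _, hdisj⟩
      exact hdisj w (by simp) x (by simp) h.symm
    have hwmem : w ∈ PySem.List.sorted (p ++ w :: s') key true := by
      rw [PySem.List.mem_sorted]; simp
    rw [pv_sorted_snoc,
      pv_idxOf_ins_of_mem key x w _ (PySem.List.sorted_pairwise_rev _ key) hwmem hxw,
      ih hnd']
    simp only [List.countP_append, List.countP_cons, List.countP_nil, decide_eq_true_eq]
    split_ifs <;> omega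

theorem pv_foldB_not_seen (w : String) (wv : Int) (P : List (String × Int))
    (hP : ∀ kv ∈ P, kv.1 ≠ w) (r : Int) :
    P.foldl (pvStepB w wv) (r, false) =
      (r + (P.countP (fun kv => decide (wv ≤ kv.2)) : Int), false) := by
  induction P generalizing r with
  | nil => simp
  | cons kv t ih =>
    have hne : kv.1 ≠ w := hP kv List.mem_cons_self
    have ht : ∀ q ∈ t, q.1 ≠ w := fun q hq => hP q (List.mem_cons_of_mem _ hq)
    have hstep : pvStepB w wv (r, false) kv = (if wv ≤ kv.2 then (r + 1, false) else (r, false)) := by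
      simp only [pvStepB, if_neg hne]
      by_cases hc : wv ≤ kv.2
      · rw [if_pos hc, if_pos]
        rcases lt_or_eq_of_le hc with h | h
        · exact Or.inl h
        · exact Or.inr ⟨h.symm, trivial⟩
      · rw [if_neg hc, if_neg]
        intro hor
        rcases hor with h | h
        · exact hc (le_of_lt h)
        · exact hc (le_of_eq h.1.symm)
    rw [List.foldl_cons, hstep, List.countP_cons]
    by_cases hc : wv ≤ kv.2
    · rw [if_pos hc, ih ht]
      simp [hc]; ring
    · rw [if_neg hc, ih ht]
      simp [hc]

theorem pv_foldB_seen (w : String) (wv : Int) (S : List (String × Int))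
    (hS : ∀ kv ∈ S, kv.1 ≠ w) (r : Int) :
    S.foldl (pvStepB w wv) (r, true) =
      (r + (S.countP (fun kv => decide (wv < kv.2)) : Int), true) := by
  induction S generalizing r with
  | nil => simp
  | cons kv t ih =>
    have hne : kv.1 ≠ w := hS kv List.mem_cons_self
    have ht : ∀ q ∈ t, q.1 ≠ w := fun q hq => hS q (List.mem_cons_of_mem _ hq)
    have hstep : pvStepB w wv (r, true) kv = (if wv < kv.2 then (r + 1, true) else (r, true)) := by
      simp only [pvStepB, if_neg hne]
      by_cases hc : wv < kv.2
      · rw [if_pos hc, if_pos (Or.inl hc)]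
      · rw [if_neg hc, if_neg]
        intro hor
        rcases hor with h | h
        · exact hc h
        · cases h.2
    rw [List.foldl_cons, hstep, List.countP_cons]
    by_cases hc : wv < kv.2
    · rw [if_pos hc, ih ht]
      simp [hc]; ring
    · rw [if_neg hc, ih ht]
      simp [hc]

-- ===== VERDICT (by name: the statement is the Claim_ definition above) =====
theorem get_rank_pos_spec : Claim_equal_get_rank_pos := by
  intro d w _
  unfold Spec_get_rank_pos get_rank_pos get_rank_pos_alt
  set dd := PySem.Dict.ofList d with hdd
  have hnd : dd.keys.Nodup := PySem.Dict.nodup_keys_ofList d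
  cases hget : dd.get? w with
  | none =>
    have hwk : w ∉ dd.keys := (PySem.Dict.get?_eq_none_iff_not_mem_keys dd w).mp hget
    have : w ∉ PySem.List.sorted dd.keys (fun k => dd.getD k 0) true := by
      rw [PySem.List.mem_sorted]; exact hwk
    simp [hget, pvScanA_of_not_mem _ _ this]
  | some wv =>
    have hwk : w ∈ dd.keys := by
      by_contra h
      rw [← PySem.Dict.get?_eq_none_iff_not_mem_keys] at h
      rw [hget] at h; cases h
    obtain ⟨p, s, hps⟩ := List.append_of_mem hwk
    have hnd' : (p ++ w :: s).Nodup := hps ▸ hnd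
    have hkeyw : dd.getD w 0 = wv := PySem.Dict.getD_of_get?_eq_some dd 0 hget
    -- A side
    have hwmem : w ∈ PySem.List.sorted dd.keys (fun k => dd.getD k 0) true := by
      rw [PySem.List.mem_sorted]; exact hwk
    have hA := pvScanA_of_mem _ w hwmem 1
    rw [hps] at hA
    rw [pv_idxOf_sorted (fun k => dd.getD k 0) w p s hnd'] at hA
    -- B side
    have hitems : dd.items = (p ++ w :: s).map (fun k => (k, dd.getD k 0)) := by
      rw [PySem.Dict.items_eq_map_keys dd hnd 0, hps]
    have hwp : w ∉ p := fun h => (List.nodup_append.mp hnd').2.2 w h w List.mem_cons_self rfl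
    have hws : w ∉ s := by
      have h2 := (List.nodup_append.mp hnd').2.1
      exact fun h => (List.nodup_cons.mp h2).1 h
    have hB : (dd.items.foldl (pvStepB w wv) (1, false)).1 =
        1 + ((p.map (fun k => (k, dd.getD k 0))).countP (fun kv => decide (wv ≤ kv.2)) : Int)
          + ((s.map (fun k => (k, dd.getD k 0))).countP (fun kv => decide (wv < kv.2)) : Int) := by
      rw [hitems]
      simp only [List.map_append, List.map_cons, List.foldl_append, List.foldl_cons]
      rw [pv_foldB_not_seen w wv _ (by
        intro kv hkv
        simp only [List.mem_map] at hkv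
        obtain ⟨k, hk, rfl⟩ := hkv
        exact fun h => hwp (h ▸ hk)) 1]
      rw [show pvStepB w wv (1 + ((p.map (fun k => (k, dd.getD k 0))).countP
          (fun kv => decide (wv ≤ kv.2)) : Int), false) (w, dd.getD w 0)
        = (1 + ((p.map (fun k => (k, dd.getD k 0))).countP (fun kv => decide (wv ≤ kv.2)) : Int), true) by
        simp [pvStepB]]
      rw [pv_foldB_seen w wv _ (by
        intro kv hkv
        simp only [List.mem_map] at hkv
        obtain ⟨k, hk, rfl⟩ := hkv
        exact fun h => hws (h ▸ hk)) _]
    -- combine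
    simp only [hget]
    have hcp : (p.map (fun k => (k, dd.getD k 0))).countP (fun kv => decide (wv ≤ kv.2))
        = p.countP (fun y => decide ((dd.getD w 0) ≤ dd.getD y 0)) := by
      rw [List.countP_map]; rw [hkeyw]; rfl
    have hcs : (s.map (fun k => (k, dd.getD k 0))).countP (fun kv => decide (wv < kv.2))
        = s.countP (fun y => decide ((dd.getD w 0) < dd.getD y 0)) := by
      rw [List.countP_map]; rw [hkeyw]; rfl
    rw [hps, hA, hB, hcp, hcs]
    have hpos : (1 : Int) + ((p.countP fun y => decide (dd.getD w 0 ≤ dd.getD y 0))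
        + (s.countP fun y => decide (dd.getD w 0 < dd.getD y 0)) : Nat) ≠ -1 := by
      push_cast; omega
    rw [if_neg hpos]
    push_cast; ring
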